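-- pv_equiv track=rewrite | github.com/jessmcelvoysemen/house-flip-analyzer | api/function_app.py | has_recent_starbucks
-- ===== SOURCE A (Python) =====
-- STARBUCKS_RECENT_OPENINGS = {
--     "Mooresville",
--     "Noblesville",
--     "Westfield",
--     "Zionsville",
--     "Greenfield",
--     "New Palestine",
--     "Brownsburg",
--     "Pendleton",
--     "Greenwood",
--     "Anderson",
--     # Indianapolis locations - mapping to specific neighborhoods
--     "Broad Ripple",  # 62nd & Keystone
--     "Beech Grove",  # Southport & Franklin Rd
-- }
--
-- def has_recent_starbucks(neighborhood: str, county_name: str) -> bool: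
--     """Check if neighborhood/city has a recent Starbucks opening (2024-2025)"""
--     # Check full neighborhood name
--     if neighborhood in STARBUCKS_RECENT_OPENINGS:
--         return True
--
--     # Check county-level cities (for suburbs)
--     city_mappings = {
--         "Hamilton": ["Noblesville", "Westfield"],
--         "Boone": ["Zionsville"],
--         "Hancock": ["Greenfield", "New Palestine"],
--         "Hendricks": ["Brownsburg"],
--         "Madison": ["Pendleton", "Anderson"],
--         "Johnson": ["Greenwood"],
--         "Morgan": ["Mooresville"],
--     }
--
--     cities = city_mappings.get(county_name, [])
--     for city in cities:
--         if city in neighborhood or city in STARBUCKS_RECENT_OPENINGS: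
--             return True
--
--     return False
-- ===== SOURCE B (Python) =====
-- STARBUCKS_RECENT_OPENINGS = {
--     "Mooresville",
--     "Noblesville",
--     "Westfield",
--     "Zionsville",
--     "Greenfield",
--     "New Palestine",
--     "Brownsburg",
--     "Pendleton",
--     "Greenwood",
--     "Anderson",
--     "Broad Ripple",
--     "Beech Grove",
-- }
--
-- # Every city listed under a county is itself in STARBUCKS_RECENT_OPENINGS, so
-- # the per-city loop in the original succeeds exactly when the county is mapped.
-- CITY_MAPPED_COUNTIES = frozenset({
--     "Hamilton", "Boone", "Hancock", "Hendricks", "Madison", "Johnson", "Morgan",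
-- })
--
-- def has_recent_starbucks(neighborhood: str, county_name: str) -> bool:
--     """Check if neighborhood/city has a recent Starbucks opening (2024-2025)"""
--     return neighborhood in STARBUCKS_RECENT_OPENINGS or county_name in CITY_MAPPED_COUNTIES
-- ===== Notes on version B (the rewrite author's own statement) =====
-- stated objective: simpler
-- what changed: Every city listed under a county already belongs to STARBUCKS_RECENT_OPENINGS, so the per-city loop (with its substring test) fires exactly when the county is a key of the mapping; B replaces the loop by two direct membership tests.
import Mathlib
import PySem

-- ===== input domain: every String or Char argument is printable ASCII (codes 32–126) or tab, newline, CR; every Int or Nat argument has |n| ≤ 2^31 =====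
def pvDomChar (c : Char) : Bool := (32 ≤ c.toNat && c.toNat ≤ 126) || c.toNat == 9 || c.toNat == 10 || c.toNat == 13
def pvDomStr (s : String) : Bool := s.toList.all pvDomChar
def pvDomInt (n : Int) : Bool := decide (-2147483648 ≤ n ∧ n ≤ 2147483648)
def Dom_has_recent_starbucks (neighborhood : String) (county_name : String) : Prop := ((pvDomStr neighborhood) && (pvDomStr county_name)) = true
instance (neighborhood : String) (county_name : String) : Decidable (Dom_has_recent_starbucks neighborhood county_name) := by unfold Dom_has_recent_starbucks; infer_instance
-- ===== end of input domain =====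

-- B replaces A's per-city loop by two direct membership tests (objective: simpler);
-- equivalent because every mapped city is itself in STARBUCKS_RECENT_OPENINGS.

-- ===== PORT A =====
def starbucksRecentOpenings : PySem.Set String := PySem.Set.ofList
  ["Mooresville", "Noblesville", "Westfield", "Zionsville", "Greenfield",
   "New Palestine", "Brownsburg", "Pendleton", "Greenwood", "Anderson",
   "Broad Ripple", "Beech Grove"]

def cityMappings : PySem.Dict String (List String) := PySem.Dict.ofList
  [("Hamilton", ["Noblesville", "Westfield"]),
   ("Boone", ["Zionsville"]),
   ("Hancock", ["Greenfield", "New Palestine"]),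
   ("Hendricks", ["Brownsburg"]),
   ("Madison", ["Pendleton", "Anderson"]),
   ("Johnson", ["Greenwood"]),
   ("Morgan", ["Mooresville"])]

-- the 'for city in cities' loop with early return
def hrsLoop (cities : List String) (neighborhood : String) : Bool :=
  match cities with
  | [] => false
  | city :: rest =>
      if PySem.Str.isIn city neighborhood || PySem.Set.contains starbucksRecentOpenings city then true
      else hrsLoop rest neighborhood

def has_recent_starbucks (neighborhood : String) (county_name : String) : Bool :=
  if PySem.Set.contains starbucksRecentOpenings neighborhood then true
  else hrsLoop (PySem.Dict.getD cityMappings county_name []) neighborhood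

-- ===== PORT B =====
def cityMappedCounties : PySem.Set String := PySem.Set.ofList
  ["Hamilton", "Boone", "Hancock", "Hendricks", "Madison", "Johnson", "Morgan"]

def has_recent_starbucks_alt (neighborhood : String) (county_name : String) : Bool :=
  PySem.Set.contains starbucksRecentOpenings neighborhood ||
    PySem.Set.contains cityMappedCounties county_name

-- ===== PRECONDITION & SPEC =====
def Spec_has_recent_starbucks (neighborhood : String) (county_name : String) (out : Bool) : Prop := out = has_recent_starbucks_alt neighborhood county_name
instance (neighborhood : String) (county_name : String) (out : Bool) : Decidable (Spec_has_recent_starbucks neighborhood county_name out) := by unfold Spec_has_recent_starbucks; infer_instance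

-- ===== CLAIM (what is proved, stated in full; the proofs are below) =====
def Claim_equal_has_recent_starbucks : Prop := ∀ (neighborhood : String) (county_name : String), Dom_has_recent_starbucks neighborhood county_name → Spec_has_recent_starbucks neighborhood county_name (has_recent_starbucks neighborhood county_name)

-- ===== LEMMAS AND PROOFS =====

-- the dict lookup returns a nonempty list whose head is in the set iff the county is mapped
theorem hrsLoop_eq_counties (neighborhood county_name : String) :
    hrsLoop (PySem.Dict.getD cityMappings county_name []) neighborhood
      = PySem.Set.contains cityMappedCounties county_name := by
  by_cases h1 : county_name = "Hamilton"
  · subst h1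
    rw [show PySem.Dict.getD cityMappings "Hamilton" [] = ["Noblesville", "Westfield"] from rfl]
    simp [hrsLoop, show "Noblesville" ∈ starbucksRecentOpenings from by decide,
          show "Hamilton" ∈ cityMappedCounties from by decide]
  by_cases h2 : county_name = "Boone"
  · subst h2
    rw [show PySem.Dict.getD cityMappings "Boone" [] = ["Zionsville"] from rfl]
    simp [hrsLoop, show "Zionsville" ∈ starbucksRecentOpenings from by decide,
          show "Boone" ∈ cityMappedCounties from by decide]
  by_cases h3 : county_name = "Hancock"
  · subst h3
    rw [show PySem.Dict.getD cityMappings "Hancock" [] = ["Greenfield", "New Palestine"] from rfl]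
    simp [hrsLoop, show "Greenfield" ∈ starbucksRecentOpenings from by decide,
          show "Hancock" ∈ cityMappedCounties from by decide]
  by_cases h4 : county_name = "Hendricks"
  · subst h4
    rw [show PySem.Dict.getD cityMappings "Hendricks" [] = ["Brownsburg"] from rfl]
    simp [hrsLoop, show "Brownsburg" ∈ starbucksRecentOpenings from by decide,
          show "Hendricks" ∈ cityMappedCounties from by decide]
  by_cases h5 : county_name = "Madison"
  · subst h5
    rw [show PySem.Dict.getD cityMappings "Madison" [] = ["Pendleton", "Anderson"] from rfl]
    simp [hrsLoop, show "Pendleton" ∈ starbucksRecentOpenings from by decide,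
          show "Madison" ∈ cityMappedCounties from by decide]
  by_cases h6 : county_name = "Johnson"
  · subst h6
    rw [show PySem.Dict.getD cityMappings "Johnson" [] = ["Greenwood"] from rfl]
    simp [hrsLoop, show "Greenwood" ∈ starbucksRecentOpenings from by decide,
          show "Johnson" ∈ cityMappedCounties from by decide]
  by_cases h7 : county_name = "Morgan"
  · subst h7
    rw [show PySem.Dict.getD cityMappings "Morgan" [] = ["Mooresville"] from rfl]
    simp [hrsLoop, show "Mooresville" ∈ starbucksRecentOpenings from by decide,
          show "Morgan" ∈ cityMappedCounties from by decide]
  · have hit : cityMappings.items =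
        [("Hamilton", ["Noblesville", "Westfield"]), ("Boone", ["Zionsville"]),
         ("Hancock", ["Greenfield", "New Palestine"]), ("Hendricks", ["Brownsburg"]),
         ("Madison", ["Pendleton", "Anderson"]), ("Johnson", ["Greenwood"]),
         ("Morgan", ["Mooresville"])] := rfl
    have b1 : ("Hamilton" == county_name) = false := by simp [Ne.symm h1]
    have b2 : ("Boone" == county_name) = false := by simp [Ne.symm h2]
    have b3 : ("Hancock" == county_name) = false := by simp [Ne.symm h3]
    have b4 : ("Hendricks" == county_name) = false := by simp [Ne.symm h4]
    have b5 : ("Madison" == county_name) = false := by simp [Ne.symm h5]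
    have b6 : ("Johnson" == county_name) = false := by simp [Ne.symm h6]
    have b7 : ("Morgan" == county_name) = false := by simp [Ne.symm h7]
    rw [show PySem.Dict.getD cityMappings county_name [] =
          (Option.map (fun x => x.2) (List.find? (fun p => p.1 == county_name) cityMappings.items)).getD []
        from rfl, hit]
    simp [List.find?, b1, b2, b3, b4, b5, b6, b7, hrsLoop,
          cityMappedCounties, PySem.Set.contains, PySem.Set.ofList, PySem.Set.add,
          h1, h2, h3, h4, h5, h6, h7]

-- ===== VERDICT (by name: the statement is the Claim_ definition above) =====
theorem has_recent_starbucks_spec : Claim_equal_has_recent_starbucks := by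
  intro neighborhood county_name _
  unfold Spec_has_recent_starbucks has_recent_starbucks has_recent_starbucks_alt
  cases hb : PySem.Set.contains starbucksRecentOpenings neighborhood
  · rw [hrsLoop_eq_counties, Bool.false_or, if_neg (by simp)]
  · rw [Bool.true_or, if_pos rfl]
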